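-- pv_equiv track=rewrite | github.com/AP-MI-2021/lab-4-raduruben372 | main.py | min_cu_ult_cifra
-- ===== SOURCE A (Python) =====
-- def min_cu_ult_cifra(lst, cifra):
--     '''
--     Afiseaza cel mai mic numar care are ultima cifra egala cu o cifra citita de la tastatura
--     :return: Cel mai mic numar cu ultima cifra egala cu cea citita la tastatura
--     '''
--     min_cu_cif = None
--     for numar in lst:
--         if numar % 10 == cifra and min_cu_cif == None:
--             min_cu_cif = numar
--         elif numar % 10 == cifra and numar < min_cu_cif:
--             min_cu_cif = numar
--     return min_cu_cif
-- ===== SOURCE B (Python) =====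
-- def min_cu_ult_cifra(lst, cifra):
--     # Two-stage version: first build the filtered sublist, then reduce it.
--     filtered = [numar for numar in lst if numar % 10 == cifra]
--     if not filtered:
--         return None
--     return min(filtered)
-- ===== Notes on version B (the rewrite author's own statement) =====
-- stated objective: simpler
-- what changed: Replaces the interleaved single-pass min-tracking loop with None sentinel branches by a two-stage filter-then-min decomposition.
import Mathlib
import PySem

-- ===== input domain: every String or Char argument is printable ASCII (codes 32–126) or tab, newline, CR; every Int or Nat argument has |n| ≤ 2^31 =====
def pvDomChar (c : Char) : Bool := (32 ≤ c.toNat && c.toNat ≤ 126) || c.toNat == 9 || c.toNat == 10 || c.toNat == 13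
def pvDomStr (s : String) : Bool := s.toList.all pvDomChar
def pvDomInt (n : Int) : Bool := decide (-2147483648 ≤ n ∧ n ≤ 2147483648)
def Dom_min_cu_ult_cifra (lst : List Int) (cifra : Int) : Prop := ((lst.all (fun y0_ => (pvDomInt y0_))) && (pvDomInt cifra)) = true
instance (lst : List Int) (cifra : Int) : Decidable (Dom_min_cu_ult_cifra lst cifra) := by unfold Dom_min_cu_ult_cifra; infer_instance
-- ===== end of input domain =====

-- B replaces A's single-pass min-tracking loop by a two-stage filter-then-min decomposition (simpler).

-- ===== PORT A =====
-- literal transliteration of A's loop: running Option accumulator, branches in source order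
-- (the second branch's 'numar < min_cu_cif' is only evaluated with min_cu_cif ≠ None, matched here)
def min_cu_ult_cifra (lst : List Int) (cifra : Int) : Option Int :=
  lst.foldl
    (fun min_cu_cif numar =>
      if (PySem.Int.mod numar 10 == cifra) && min_cu_cif.isNone then
        some numar
      else if (PySem.Int.mod numar 10 == cifra) &&
              (match min_cu_cif with | some m => decide (numar < m) | none => false) then
        some numar
      else
        min_cu_cif)
    none

-- ===== PORT B =====
-- stage 1: the filtered sublist; stage 2: its minimum (None when empty)
def min_cu_ult_cifra_alt (lst : List Int) (cifra : Int) : Option Int :=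
  let filtered := lst.filter (fun numar => PySem.Int.mod numar 10 == cifra)
  if filtered = [] then none
  else PySem.List.min? filtered (fun x => x)

-- ===== PRECONDITION & SPEC =====
def Spec_min_cu_ult_cifra (lst : List Int) (cifra : Int) (out : Option Int) : Prop := out = min_cu_ult_cifra_alt lst cifra
instance (lst : List Int) (cifra : Int) (out : Option Int) : Decidable (Spec_min_cu_ult_cifra lst cifra out) := by unfold Spec_min_cu_ult_cifra; infer_instance

-- ===== CLAIM (what is proved, stated in full; the proofs are below) =====
def Claim_equal_min_cu_ult_cifra : Prop := ∀ (lst : List Int) (cifra : Int), Dom_min_cu_ult_cifra lst cifra → Spec_min_cu_ult_cifra lst cifra (min_cu_ult_cifra lst cifra)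

-- ===== LEMMAS AND PROOFS =====

-- head-first recursive minimum of the q-filtered elements (proof-only reference function)
def mMin (q : Int → Bool) : List Int → Option Int
  | [] => none
  | x :: t =>
    if q x then
      match mMin q t with
      | none => some x
      | some m => some (min x m)
    else mMin q t

def omin (a b : Option Int) : Option Int :=
  match a, b with
  | none, b => b
  | some m, none => some m
  | some m, some y => some (min m y)

theorem foldA_eq_omin (q : Int → Bool) (lst : List Int) (acc : Option Int) :
    lst.foldl
      (fun min_cu_cif numar =>
        if q numar && min_cu_cif.isNone then
          some numar
        else if q numar &&
                (match min_cu_cif with | some m => decide (numar < m) | none => false) then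
          some numar
        else
          min_cu_cif)
      acc = omin acc (mMin q lst) := by
  induction lst generalizing acc with
  | nil => cases acc <;> simp [omin, mMin]
  | cons x t ih =>
    simp only [List.foldl_cons, mMin]
    by_cases hp : q x = true
    · cases acc with
      | none =>
        simp only [hp, Option.isNone_none, Bool.and_true, if_pos, ih]
        cases mMin q t with
        | none => simp [omin]
        | some m => simp [omin]
      | some m =>
        by_cases hlt : x < m
        · simp only [hp, Option.isNone_some, Bool.and_false, Bool.false_eq_true, if_false,
            decide_eq_true hlt, Bool.and_true, if_pos, ih]
          cases mMin q t with
          | none => simp [omin]; omega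
          | some y =>
            simp only [omin, Option.some.injEq]
            omega
        · simp only [hp, Option.isNone_some, Bool.and_false, Bool.false_eq_true, if_false,
            decide_eq_false hlt, Bool.and_false, ih]
          cases mMin q t with
          | none => simp [omin]; omega
          | some y =>
            simp only [if_pos, omin, Option.some.injEq]
            omega
    · simp only [Bool.not_eq_true] at hp
      simp only [hp, Bool.false_and, Bool.false_eq_true, if_false]
      exact ih acc

theorem foldl_min_pull (x : Int) : ∀ (s : List Int) (y : Int),
    s.foldl min (min x y) = min x (s.foldl min y) := by
  intro s
  induction s with
  | nil => intro y; simp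
  | cons z s ih =>
    intro y
    simp only [List.foldl_cons, min_assoc]
    exact ih (min y z)

theorem mMin_eq_filterMin (q : Int → Bool) (lst : List Int) :
    mMin q lst =
      match lst.filter q with
      | [] => none
      | x :: t => some (t.foldl min x) := by
  induction lst with
  | nil => simp [mMin]
  | cons x t ih =>
    by_cases hp : q x = true
    · simp only [mMin, hp, if_pos, List.filter_cons, ih]
      cases hft : t.filter q with
      | nil => simp
      | cons y s => simp [foldl_min_pull]
    · simp only [Bool.not_eq_true] at hp
      simp [mMin, hp, ih]

-- ===== VERDICT (by name: the statement is the Claim_ definition above) =====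
theorem min_cu_ult_cifra_spec : Claim_equal_min_cu_ult_cifra := by
  intro lst cifra _
  unfold Spec_min_cu_ult_cifra min_cu_ult_cifra min_cu_ult_cifra_alt
  rw [foldA_eq_omin, mMin_eq_filterMin]
  cases hf : lst.filter (fun numar => PySem.Int.mod numar 10 == cifra) with
  | nil => simp [omin]
  | cons x t => simp [omin, PySem.List.min?_id_cons]
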